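-- pv_equiv track=rewrite | github.com/SatoshiReport/ci_shared | ci_tools/scripts/documentation_guard.py | _group_missing_docs
-- ===== SOURCE A (Python) =====
-- from typing import List, Tuple
--
-- CATEGORY_KEYS = [
--     ("Base", "base"),
--     ("Modules", "modules"),
--     ("Architecture", "architecture"),
--     ("Domains", "domains"),
--     ("Operations", "operations"),
--     ("Reference", "reference"),
-- ]
--
-- def _group_missing_docs(
--     missing: List[str], discovery_info: dict
-- ) -> dict[str, List[str]]:
--     grouped: dict[str, List[str]] = {label: [] for label, _ in CATEGORY_KEYS}
--     for doc in missing: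
--         for label, key in CATEGORY_KEYS:
--             if doc in discovery_info.get(key, []):
--                 grouped[label].append(doc)
--                 break
--     return grouped
-- ===== SOURCE B (Python) =====
-- CATEGORY_KEYS = [
--     ("Base", "base"),
--     ("Modules", "modules"),
--     ("Architecture", "architecture"),
--     ("Domains", "domains"),
--     ("Operations", "operations"),
--     ("Reference", "reference"),
-- ]
--
-- def _group_missing_docs(missing, discovery_info):
--     # Build an inverted index once (first category in CATEGORY_KEYS order wins),
--     # then a single flat pass over `missing`.
--     doc_to_label = {}
--     for label, key in CATEGORY_KEYS:
--         for doc in discovery_info.get(key, []):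
--             doc_to_label.setdefault(doc, label)
--     grouped = {label: [] for label, _ in CATEGORY_KEYS}
--     for doc in missing:
--         label = doc_to_label.get(doc)
--         if label is not None:
--             grouped[label].append(doc)
--     return grouped
-- ===== Notes on version B (the rewrite author's own statement) =====
-- stated objective: faster
-- what changed: Replaces A's per-doc scan over every category list with a one-time inverted index (doc -> first matching label) built via setdefault, followed by a single flat pass over missing.
import Mathlib
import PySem

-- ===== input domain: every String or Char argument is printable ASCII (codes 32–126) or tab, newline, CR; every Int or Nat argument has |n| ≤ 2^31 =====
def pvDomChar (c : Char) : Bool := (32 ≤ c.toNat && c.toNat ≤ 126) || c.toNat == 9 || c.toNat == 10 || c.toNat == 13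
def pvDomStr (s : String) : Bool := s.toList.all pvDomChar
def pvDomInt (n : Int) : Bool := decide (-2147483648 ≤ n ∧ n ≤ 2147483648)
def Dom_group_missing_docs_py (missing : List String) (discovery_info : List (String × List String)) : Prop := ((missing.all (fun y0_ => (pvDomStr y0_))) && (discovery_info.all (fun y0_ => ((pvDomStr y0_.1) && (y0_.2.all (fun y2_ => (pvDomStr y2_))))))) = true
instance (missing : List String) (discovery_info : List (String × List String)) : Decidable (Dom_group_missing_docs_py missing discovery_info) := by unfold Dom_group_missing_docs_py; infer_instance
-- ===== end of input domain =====

-- B builds an inverted doc→label index once (first category wins) and then makes one flat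
-- pass over `missing`, replacing A's per-doc scan over every category list.


def CATEGORY_KEYS : List (String × String) :=
  [("Base", "base"), ("Modules", "modules"), ("Architecture", "architecture"),
   ("Domains", "domains"), ("Operations", "operations"), ("Reference", "reference")]

-- ===== PORT A =====
-- inner `for label, key in CATEGORY_KEYS: … break` loop of A
def pvAInner (discovery : PySem.Dict String (List String)) (doc : String) :
    List (String × String) → PySem.Dict String (List String) → PySem.Dict String (List String)
  | [], grouped => grouped
  | (label, key) :: rest, grouped =>
    if (discovery.getD key []).contains doc then
      grouped.insert label (grouped.getD label [] ++ [doc])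
    else pvAInner discovery doc rest grouped

def group_missing_docs_py (missing : List String) (discovery_info : List (String × List String)) : List (String × List String) :=
  let discovery := PySem.Dict.mk discovery_info
  let grouped := CATEGORY_KEYS.foldl (fun d p => d.insert p.1 ([] : List String)) PySem.Dict.empty
  (missing.foldl (fun g doc => pvAInner discovery doc CATEGORY_KEYS g) grouped).items

-- ===== PORT B =====
def group_missing_docs_py_alt (missing : List String) (discovery_info : List (String × List String)) : List (String × List String) :=
  let discovery := PySem.Dict.mk discovery_info
  -- inverted index: first category in CATEGORY_KEYS order wins (setdefault)
  let docToLabel := CATEGORY_KEYS.foldl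
      (fun idx p => (discovery.getD p.2 []).foldl (fun i d => i.setdefault d p.1) idx)
      (PySem.Dict.empty : PySem.Dict String String)
  let grouped := CATEGORY_KEYS.foldl (fun d p => d.insert p.1 ([] : List String)) PySem.Dict.empty
  (missing.foldl (fun g doc =>
      match docToLabel.get? doc with
      | some label => g.insert label (g.getD label [] ++ [doc])
      | none => g) grouped).items

-- ===== PRECONDITION & SPEC =====
def Spec_group_missing_docs_py (missing : List String) (discovery_info : List (String × List String)) (out : List (String × List String)) : Prop := out = group_missing_docs_py_alt missing discovery_info
instance (missing : List String) (discovery_info : List (String × List String)) (out : List (String × List String)) : Decidable (Spec_group_missing_docs_py missing discovery_info out) := by unfold Spec_group_missing_docs_py; infer_instance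

-- ===== CLAIM (what is proved, stated in full; the proofs are below) =====
def Claim_equal_group_missing_docs_py : Prop := ∀ (missing : List String) (discovery_info : List (String × List String)), Dom_group_missing_docs_py missing discovery_info → Spec_group_missing_docs_py missing discovery_info (group_missing_docs_py missing discovery_info)

-- ===== LEMMAS AND PROOFS =====

-- first label in cks whose category list contains doc
def pvFirstLabel (discovery : PySem.Dict String (List String)) (doc : String) :
    List (String × String) → Option String
  | [] => none
  | (label, key) :: rest =>
    if (discovery.getD key []).contains doc then some label
    else pvFirstLabel discovery doc rest

theorem setdefault_fold_get? (docs : List String) (label : String)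
    (idx : PySem.Dict String String) (doc : String) :
    (docs.foldl (fun i d => i.setdefault d label) idx).get? doc =
      if idx.get? doc = none ∧ docs.contains doc then some label else idx.get? doc := by
  induction docs generalizing idx with
  | nil => simp
  | cons d rest ih =>
    simp only [List.foldl_cons, ih]
    by_cases hdd : doc = d
    · subst hdd
      rw [PySem.Dict.get?_setdefault_self]
      cases h : idx.get? doc <;> simp
    · rw [PySem.Dict.get?_setdefault_of_ne _ _ hdd]
      simp [hdd]

theorem build_fold_get? (discovery : PySem.Dict String (List String)) (doc : String)
    (cks : List (String × String)) (idx : PySem.Dict String String) :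
    (cks.foldl (fun i p => (discovery.getD p.2 []).foldl (fun i d => i.setdefault d p.1) i) idx).get? doc =
      (idx.get? doc).or (pvFirstLabel discovery doc cks) := by
  induction cks generalizing idx with
  | nil => simp [pvFirstLabel]
  | cons p rest ih =>
    obtain ⟨label, key⟩ := p
    simp only [List.foldl_cons, ih, setdefault_fold_get?, pvFirstLabel]
    cases h : idx.get? doc with
    | some l => simp
    | none =>
      simp only [Option.none_or]
      by_cases hm : doc ∈ discovery.getD key [] <;> simp [hm]

theorem pvAInner_eq (discovery : PySem.Dict String (List String)) (doc : String)
    (cks : List (String × String)) (g : PySem.Dict String (List String)) :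
    pvAInner discovery doc cks g =
      match pvFirstLabel discovery doc cks with
      | some label => g.insert label (g.getD label [] ++ [doc])
      | none => g := by
  induction cks with
  | nil => rfl
  | cons p rest ih =>
    obtain ⟨label, key⟩ := p
    simp only [pvAInner, pvFirstLabel]
    by_cases hm : doc ∈ discovery.getD key [] <;> simp [hm, ih]

-- ===== VERDICT (by name: the statement is the Claim_ definition above) =====
theorem group_missing_docs_py_spec : Claim_equal_group_missing_docs_py := by
  intro missing discovery_info _
  unfold Spec_group_missing_docs_py group_missing_docs_py group_missing_docs_py_alt
  have hstep : ∀ (g : PySem.Dict String (List String)) (doc : String),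
      pvAInner (PySem.Dict.mk discovery_info) doc CATEGORY_KEYS g =
        match (CATEGORY_KEYS.foldl
            (fun idx p => ((PySem.Dict.mk discovery_info).getD p.2 []).foldl
              (fun i d => i.setdefault d p.1) idx)
            (PySem.Dict.empty : PySem.Dict String String)).get? doc with
        | some label => g.insert label (g.getD label [] ++ [doc])
        | none => g := by
    intro g doc
    rw [build_fold_get?, PySem.Dict.get?_empty, Option.none_or, pvAInner_eq]
  simp only [funext fun g => funext fun doc => hstep g doc]
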